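-- pv_equiv track=rewrite | github.com/vas-ide/vas_ide | Coding/PY/Differrent kind of set/Square Board.py | possition_analiz
-- ===== SOURCE A (Python) =====
-- def possition_analiz(game_lst, steps, token):
--     possition = 0
--     if abs(steps) + abs(token) < len(game_lst):
--         possition = game_lst[token + steps]
--     elif abs(steps) + abs(token) == len(game_lst):
--         possition = 0
--     elif steps % len(game_lst) == 0:
--         possition = game_lst[token]
--     elif steps > len(game_lst):
--         for item in range(steps):
--             if abs(steps) > len(game_lst):
--                 if steps > 0:
--                     steps -= len(game_lst)
--                 else:
--                     steps += len(game_lst)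
--             else:
--                 possition = game_lst[token + steps]
--                 break
--     elif abs(steps) + abs(token) > len(game_lst):
--         possition = game_lst[token + (steps - len(game_lst))]
--     return possition
-- ===== SOURCE B (Python) =====
-- def possition_analiz(game_lst, steps, token):
--     n = len(game_lst)
--     reach = abs(steps) + abs(token)
--     if reach < n:
--         return game_lst[token + steps]
--     if reach == n:
--         return 0
--     r = steps % n
--     if r == 0:
--         return game_lst[token]
--     if steps > n:
--         # one modulo replaces A's repeated-subtraction reduction of steps
--         return game_lst[token + r]
--     return game_lst[token + steps - n]
-- ===== Notes on version B (the rewrite author's own statement) =====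
-- stated objective: simpler
-- what changed: The repeated-subtraction loop that reduces steps into range is replaced by a single modulo, and the branch cascade becomes a flat early-return chain.
import Mathlib
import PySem

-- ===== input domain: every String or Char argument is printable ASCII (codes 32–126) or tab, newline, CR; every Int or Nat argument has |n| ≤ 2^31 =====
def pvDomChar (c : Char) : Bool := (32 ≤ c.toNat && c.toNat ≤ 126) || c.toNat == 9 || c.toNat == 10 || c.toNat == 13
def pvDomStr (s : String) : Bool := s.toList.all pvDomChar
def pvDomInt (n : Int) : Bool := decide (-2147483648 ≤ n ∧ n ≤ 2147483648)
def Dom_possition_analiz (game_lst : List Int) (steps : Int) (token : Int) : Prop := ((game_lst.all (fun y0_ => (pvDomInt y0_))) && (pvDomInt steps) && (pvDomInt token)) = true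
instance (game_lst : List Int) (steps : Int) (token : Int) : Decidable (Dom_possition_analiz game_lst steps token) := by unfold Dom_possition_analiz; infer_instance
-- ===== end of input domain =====

-- B replaces A's repeated-subtraction loop by a single modulo and flattens the branches into an early-return chain; objective: simpler.

-- ===== PORT A =====
-- the 'for item in range(steps)' loop: mutable steps, break = return of the indexed value
def pvALoop (g : List Int) (t : Int) : List Int → Int → Int → Int
  | [], _, pos => pos
  | _ :: rest, s, pos =>
    if |s| > (g.length : Int) then
      if s > 0 then pvALoop g t rest (s - g.length) pos
      else pvALoop g t rest (s + g.length) pos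
    else (PySem.List.pyGet? g (t + s)).getD 0   -- break; none = IndexError, excluded by Pre_

def possition_analiz (game_lst : List Int) (steps : Int) (token : Int) : Int :=
  let n : Int := game_lst.length
  if |steps| + |token| < n then (PySem.List.pyGet? game_lst (token + steps)).getD 0
  else if |steps| + |token| = n then 0
  else if PySem.Int.mod steps n = 0 then (PySem.List.pyGet? game_lst token).getD 0
  else if steps > n then pvALoop game_lst token (PySem.List.pyRange 0 steps 1) steps 0
  else if |steps| + |token| > n then (PySem.List.pyGet? game_lst (token + (steps - n))).getD 0
  else 0

-- ===== PORT B =====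
def possition_analiz_alt (game_lst : List Int) (steps : Int) (token : Int) : Int :=
  let n : Int := game_lst.length
  let reach := |steps| + |token|
  if reach < n then (PySem.List.pyGet? game_lst (token + steps)).getD 0
  else if reach = n then 0
  else
    let r := PySem.Int.mod steps n
    if r = 0 then (PySem.List.pyGet? game_lst token).getD 0
    else if steps > n then (PySem.List.pyGet? game_lst (token + r)).getD 0
    else (PySem.List.pyGet? game_lst (token + steps - n)).getD 0

-- ===== PRECONDITION & SPEC =====
-- Pre_ excludes exactly the inputs where A raises (ZeroDivisionError on an empty list with
-- steps or token nonzero, or IndexError from an out-of-range computed index); B raises there too.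
def Pre_possition_analiz (game_lst : List Int) (steps : Int) (token : Int) : Prop :=
  let n : Int := game_lst.length
  |steps| + |token| < n ∨ |steps| + |token| = n ∨
  (n ≠ 0 ∧
    ((PySem.Int.mod steps n = 0 ∧ -n ≤ token ∧ token < n) ∨
     (PySem.Int.mod steps n ≠ 0 ∧ steps > n ∧
        -n ≤ token + PySem.Int.mod steps n ∧ token + PySem.Int.mod steps n < n) ∨
     (PySem.Int.mod steps n ≠ 0 ∧ steps ≤ n ∧
        -n ≤ token + steps - n ∧ token + steps - n < n)))
instance (game_lst : List Int) (steps : Int) (token : Int) : Decidable (Pre_possition_analiz game_lst steps token) := by unfold Pre_possition_analiz; infer_instance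

def pvWitness_possition_analiz : List Int × Int × Int := ([10, 20, 30], 7, 1)

def Spec_possition_analiz (game_lst : List Int) (steps : Int) (token : Int) (out : Int) : Prop := out = possition_analiz_alt game_lst steps token
instance (game_lst : List Int) (steps : Int) (token : Int) (out : Int) : Decidable (Spec_possition_analiz game_lst steps token out) := by unfold Spec_possition_analiz; infer_instance

-- ===== CLAIM (what is proved, stated in full; the proofs are below) =====
def Claim_equal_possition_analiz : Prop := ∀ (game_lst : List Int) (steps : Int) (token : Int), Dom_possition_analiz game_lst steps token → Pre_possition_analiz game_lst steps token → Spec_possition_analiz game_lst steps token (possition_analiz game_lst steps token)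

-- ===== LEMMAS AND PROOFS =====

-- the loop computes the residue: with enough fuel, A's repeated subtraction lands on steps % n
theorem pvALoop_eq (g : List Int) (t : Int) (hn : 0 < (g.length : Int)) :
    ∀ (l : List Int) (s : Int), 0 < s → s ≤ (g.length : Int) * l.length →
      PySem.Int.mod s (g.length : Int) ≠ 0 →
      pvALoop g t l s 0 = (PySem.List.pyGet? g (t + PySem.Int.mod s (g.length : Int))).getD 0 := by
  intro l
  induction l with
  | nil => intro s hs hle _; simp at hle; omega
  | cons x rest ih =>
    intro s hs hle hr
    have hcons : ((x :: rest).length : Int) = (rest.length : Int) + 1 := by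
      push_cast [List.length_cons]; ring
    have habs : |s| = s := abs_of_pos hs
    by_cases h : |s| > (g.length : Int)
    · rw [habs] at h
      have hsn : s > (g.length : Int) := h
      rw [pvALoop, if_pos (show |s| > (g.length : Int) by rwa [habs]), if_pos hs]
      have hmod : PySem.Int.mod (s - g.length) (g.length : Int) = PySem.Int.mod s (g.length : Int) := by
        rw [PySem.Int.mod_eq_emod_of_pos hn, PySem.Int.mod_eq_emod_of_pos hn,
          Int.sub_emod_right]
      have hle' : s - (g.length : Int) ≤ (g.length : Int) * rest.length := by
        rw [hcons] at hle; nlinarith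
      rw [ih (s - g.length) (by omega) hle' (hmod ▸ hr), hmod]
    · rw [habs] at h
      rw [pvALoop, if_neg (show ¬ |s| > (g.length : Int) by rwa [habs])]
      have hmodpos : PySem.Int.mod s (g.length : Int) = s % (g.length : Int) :=
        PySem.Int.mod_eq_emod_of_pos hn
      have : PySem.Int.mod s (g.length : Int) = s := by
        rw [hmodpos]
        rcases lt_or_eq_of_le (show s ≤ (g.length : Int) by omega) with h1 | h1
        · exact Int.emod_eq_of_lt (by omega) h1
        · exfalso; apply hr; rw [hmodpos, h1]; simp
      rw [this]

-- ===== VERDICT (by name: the statement is the Claim_ definition above) =====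
theorem possition_analiz_spec : Claim_equal_possition_analiz := by
  intro g s t _ hpre
  unfold Spec_possition_analiz possition_analiz possition_analiz_alt
  simp only
  split_ifs with h1 h2 h3 h4 h5
  · rfl
  · rfl
  · rfl
  · -- loop branch
    have hn : 0 < (g.length : Int) := by
      unfold Pre_possition_analiz at hpre
      rcases hpre with h | h | ⟨hne, _⟩
      · exact absurd h h1
      · exact absurd h h2
      · omega
    have hfuel : (PySem.List.pyRange 0 s 1).length = (s : Int).toNat := by
      rw [PySem.List.length_pyRange_one]; simp
    apply pvALoop_eq g t hn _ s (by omega) _ h3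
    rw [hfuel]
    have : ((s.toNat : Int)) = s := by omega
    nlinarith [this]
  · have : t + (s - (g.length : Int)) = t + s - g.length := by ring
    rw [this]
  · -- fall-through: impossible since |s|+|t| > n here
    exfalso; omega

theorem pv_witness_ok : Dom_possition_analiz pvWitness_possition_analiz.1 pvWitness_possition_analiz.2.1 pvWitness_possition_analiz.2.2 ∧ Pre_possition_analiz pvWitness_possition_analiz.1 pvWitness_possition_analiz.2.1 pvWitness_possition_analiz.2.2 := by decide
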